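-- pv_equiv track=rewrite | github.com/rogeriog/dfttoolkit | plot_band_geral.py | SplitBandsSection
-- ===== SOURCE A (Python) =====
-- def SplitBandsSection(test_list):
--     size = len(test_list)
--     idx_list = [idx + 1 for idx, val in
--                 enumerate(test_list) if val == "|"]
--
--     idx_list.insert(0,0)
--     idx_list.append(size)
--     res=[]
--     for i in range(len(idx_list)-1):
--         if i < (len(idx_list)-2):
--             res.append(test_list[idx_list[i]:idx_list[i+1]-1])
--         else: # last section
--             res.append(test_list[idx_list[i]:idx_list[i+1]])
--     return res
-- ===== SOURCE B (Python) =====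
-- def SplitBandsSection(test_list):
--     res = []
--     current = []
--     for val in test_list:
--         if val == "|":
--             res.append(current)
--             current = []
--         else:
--             current.append(val)
--     res.append(current)
--     return res
-- ===== Notes on version B (the rewrite author's own statement) =====
-- stated objective: simpler
-- what changed: Replaced the delimiter-index collection plus slicing between consecutive indices by a single accumulating pass that builds each section directly.
import Mathlib
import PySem

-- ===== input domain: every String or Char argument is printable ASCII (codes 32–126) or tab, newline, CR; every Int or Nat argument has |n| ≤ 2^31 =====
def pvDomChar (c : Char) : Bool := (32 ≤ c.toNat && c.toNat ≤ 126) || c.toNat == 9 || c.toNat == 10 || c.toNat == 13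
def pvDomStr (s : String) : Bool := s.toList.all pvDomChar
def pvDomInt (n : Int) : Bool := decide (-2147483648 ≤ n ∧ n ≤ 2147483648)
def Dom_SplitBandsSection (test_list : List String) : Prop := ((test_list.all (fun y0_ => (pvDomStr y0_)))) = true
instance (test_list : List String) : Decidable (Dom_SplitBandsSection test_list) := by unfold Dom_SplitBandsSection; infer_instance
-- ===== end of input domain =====

-- B replaces A's delimiter-index collection + slicing with one accumulating pass (objective: simpler).

-- ===== PORT A =====
def SplitBandsSection (test_list : List String) : List (List String) :=
  let size : Int := test_list.length
  -- [idx + 1 for idx, val in enumerate(test_list) if val == "|"]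
  let idx_list : List Int :=
    (PySem.List.enumerate test_list 0).filterMap
      (fun p => if p.2 = "|" then some (p.1 + 1) else none)
  let idx_list := PySem.List.insert idx_list 0 0      -- idx_list.insert(0, 0)
  let idx_list := idx_list ++ [size]                  -- idx_list.append(size)
  let res : List (List String) :=
    (PySem.List.pyRange 0 ((idx_list.length : Int) - 1) 1).foldl
      (fun res i =>
        if i < ((idx_list.length : Int) - 2) then
          res ++ [PySem.List.slice test_list (some (PySem.List.pyGetD idx_list i 0))
                    (some (PySem.List.pyGetD idx_list (i + 1) 0 - 1))]
        else
          res ++ [PySem.List.slice test_list (some (PySem.List.pyGetD idx_list i 0))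
                    (some (PySem.List.pyGetD idx_list (i + 1) 0))]) []
  res

-- ===== PORT B =====
def SplitBandsSection_alt (test_list : List String) : List (List String) :=
  let p : List (List String) × List String :=
    test_list.foldl
      (fun st val =>
        if val = "|" then (st.1 ++ [st.2], ([] : List String))
        else (st.1, st.2 ++ [val])) ([], [])
  p.1 ++ [p.2]

-- ===== PRECONDITION & SPEC =====
def Spec_SplitBandsSection (test_list : List String) (out : List (List String)) : Prop := out = SplitBandsSection_alt test_list
instance (test_list : List String) (out : List (List String)) : Decidable (Spec_SplitBandsSection test_list out) := by unfold Spec_SplitBandsSection; infer_instance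

-- ===== CLAIM (what is proved, stated in full; the proofs are below) =====
def Claim_equal_SplitBandsSection : Prop := ∀ (test_list : List String), Dom_SplitBandsSection test_list → Spec_SplitBandsSection test_list (SplitBandsSection test_list)

-- ===== LEMMAS AND PROOFS =====

-- canonical recursive splitter; both ports are proved equal to it
def spCanon : List String → List (List String)
  | [] => [[]]
  | x :: xs => if x = "|" then [] :: spCanon xs else (spCanon xs).modifyHead (x :: ·)

-- positions+1 of the delimiters, recursively
def idxsCanon : List String → List Int
  | [] => []
  | x :: xs => (if x = "|" then [1] else []) ++ (idxsCanon xs).map (· + 1)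

-- A's loop as structural recursion over the boundary list
def goA (xs : List String) : List Int → List (List String)
  | [] => []
  | [_] => []
  | b1 :: b2 :: rest =>
    (if rest.isEmpty then PySem.List.slice xs (some b1) (some b2)
     else PySem.List.slice xs (some b1) (some (b2 - 1))) :: goA xs (b2 :: rest)

theorem spCanon_ne_nil (xs : List String) : spCanon xs ≠ [] := by
  induction xs with
  | nil => simp [spCanon]
  | cons x xs ih =>
    simp only [spCanon]
    split
    · simp
    · cases h : spCanon xs with
      | nil => exact absurd h ih
      | cons a t => simp [List.modifyHead]

theorem idxsCanon_mem' (xs : List String) :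
    ∀ b ∈ idxsCanon xs, 1 ≤ b ∧ b ≤ (xs.length : Int) := by
  induction xs with
  | nil => simp [idxsCanon]
  | cons x xs ih =>
    intro b h
    simp only [idxsCanon, List.mem_append, List.mem_map] at h
    rcases h with h | ⟨c, hc, rfl⟩
    · have hb : b = 1 := by
        by_cases hx : x = "|" <;> simp [hx] at h
        exact h
      subst hb
      simp only [List.length_cons]
      push_cast
      exact ⟨trivial, by omega⟩
    · have := ih c hc
      simp only [List.length_cons]
      push_cast
      omega

theorem idxsCanon_mem {xs : List String} {b : Int} (h : b ∈ idxsCanon xs) :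
    1 ≤ b ∧ b ≤ (xs.length : Int) := idxsCanon_mem' xs b h

-- the comprehension equals idxsCanon
theorem filterMap_enumerate_eq (xs : List String) (s : Int) :
    (PySem.List.enumerate xs s).filterMap
      (fun p => if p.2 = "|" then some (p.1 + 1) else none)
      = (idxsCanon xs).map (· + s) := by
  induction xs generalizing s with
  | nil => simp [PySem.List.enumerate_nil, idxsCanon]
  | cons x xs ih =>
    rw [PySem.List.enumerate_cons, List.filterMap_cons]
    by_cases hx : x = "|"
    · subst hx
      simp [ih, idxsCanon, List.map_map, Function.comp, add_comm, add_left_comm]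
    · simp [hx, ih, idxsCanon, List.map_map, Function.comp, add_comm, add_left_comm]

-- shifting every boundary by 1 and prepending one element leaves the sections unchanged
theorem goA_shift (x : String) (xs : List String) :
    ∀ (bs : List Int), (∀ b ∈ bs, 0 ≤ b) → (∀ b ∈ bs.tail.dropLast, 1 ≤ b) →
    goA (x :: xs) (bs.map (· + 1)) = goA xs bs := by
  intro bs
  induction bs with
  | nil => intro _ _; simp [goA]
  | cons b1 rest ih =>
    intro h0 h1
    cases rest with
    | nil => simp [goA]
    | cons b2 rest2 =>
      cases rest2 with
      | nil =>
        have hb1 : 0 ≤ b1 := h0 b1 (by simp)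
        have hb2 : 0 ≤ b2 := h0 b2 (by simp)
        simp only [List.map_cons, List.map_nil, goA, List.isEmpty_nil, reduceIte]
        congr 1
        rw [PySem.List.slice_toNat _ (by omega) (by omega),
            PySem.List.slice_toNat _ hb1 hb2]
        have e1 : (b1 + 1).toNat = b1.toNat + 1 := by omega
        have e2 : (b2 + 1).toNat = b2.toNat + 1 := by omega
        simp [e1, e2]
      | cons b3 rest3 =>
        have hb1 : 0 ≤ b1 := h0 b1 (by simp)
        have hb2 : 1 ≤ b2 := h1 b2 (by simp [List.dropLast])
        simp only [List.map_cons, goA, List.isEmpty_cons, Bool.false_eq_true, reduceIte]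
        congr 1
        · rw [PySem.List.slice_toNat _ (by omega) (by omega),
              PySem.List.slice_toNat _ hb1 (by omega)]
          have e3 : (b2 + 1 - 1).toNat - (b1 + 1).toNat = (b2 - 1).toNat - b1.toNat := by
            omega
          have e1 : (b1 + 1).toNat = b1.toNat + 1 := by omega
          rw [e3, e1]
          simp
        · simpa only [List.map_cons] using
            ih (fun b hb => h0 b (List.mem_cons_of_mem _ hb))
              (fun b hb => h1 b (by
                simp only [List.tail_cons] at hb ⊢
                rw [List.dropLast_cons₂]
                exact List.mem_cons_of_mem _ hb))

-- prepending a non-delimiter element prepends it to the first section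
theorem goA_cons (x : String) (xs : List String) (bs : List Int)
    (hne : bs ≠ []) (h0 : ∀ b ∈ bs, 0 ≤ b) (h1 : ∀ b ∈ bs.dropLast, 1 ≤ b) :
    goA (x :: xs) (0 :: bs.map (· + 1)) = (goA xs (0 :: bs)).modifyHead (x :: ·) := by
  cases bs with
  | nil => exact absurd rfl hne
  | cons b2 rest =>
    cases rest with
    | nil =>
      have hb2 : 0 ≤ b2 := h0 b2 (by simp)
      simp only [List.map_cons, List.map_nil, goA, List.isEmpty_nil, reduceIte, List.modifyHead]
      congr 1
      rw [PySem.List.slice_toNat _ (by omega) (by omega),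
          PySem.List.slice_toNat _ (by omega) hb2]
      have e2 : (b2 + 1).toNat = b2.toNat + 1 := by omega
      simp [e2]
    | cons b3 rest3 =>
      have hb2 : 1 ≤ b2 := h1 b2 (by simp [List.dropLast])
      simp only [List.map_cons, goA, List.isEmpty_cons, Bool.false_eq_true, reduceIte, List.modifyHead]
      congr 1
      · rw [PySem.List.slice_toNat _ (by omega) (by omega),
            PySem.List.slice_toNat _ (by omega) (by omega)]
        have e2 : (b2 + 1 - 1).toNat - Int.toNat 0 = ((b2 - 1).toNat - Int.toNat 0) + 1 := by
          omega
        rw [e2]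
        simp
      · have := goA_shift x xs (b2 :: b3 :: rest3)
          (fun b hb => h0 b hb)
          (fun b hb => h1 b (by
            simp only [List.tail_cons] at hb
            rw [List.dropLast_cons₂]
            exact List.mem_cons_of_mem _ hb))
        simpa only [List.map_cons] using this

-- goA over the canonical boundary list computes the canonical split
theorem goA_idxs (xs : List String) :
    goA xs (0 :: idxsCanon xs ++ [(xs.length : Int)]) = spCanon xs := by
  induction xs with
  | nil => simp [idxsCanon, goA, spCanon, PySem.List.slice_toNat]
  | cons x xs ih =>
    by_cases hx : x = "|"
    · subst hx
      simp only [idxsCanon, spCanon, reduceIte, List.singleton_append, List.cons_append,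
        List.length_cons, Nat.cast_add, Nat.cast_one]
      have step : ∀ (t : List Int), t ≠ [] → goA ("|" :: xs) ((0 : Int) :: 1 :: t)
          = PySem.List.slice ("|" :: xs) (some 0) (some (1 - 1)) :: goA ("|" :: xs) (1 :: t) := by
        intro t ht
        cases t with
        | nil => exact absurd rfl ht
        | cons c cs => rfl
      rw [List.nil_append, step _ (by simp)]
      have hlist : (1 : Int) :: ((idxsCanon xs).map (· + 1) ++ [(xs.length : Int) + 1])
          = (0 :: idxsCanon xs ++ [(xs.length : Int)]).map (· + 1) := by
        simp
      rw [hlist]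
      rw [goA_shift "|" xs _
            (by intro b hb
                simp only [List.cons_append, List.mem_cons, List.mem_append,
                  List.mem_singleton, List.not_mem_nil, or_false, or_assoc] at hb
                rcases hb with rfl | hb | rfl
                · omega
                · exact le_trans (by omega) (idxsCanon_mem hb).1
                · positivity)
            (by intro b hb
                simp only [List.cons_append, List.tail_cons, List.dropLast_concat] at hb
                exact (idxsCanon_mem hb).1), ih]
      have h00 : PySem.List.slice ("|" :: xs) (some (0 : Int)) (some (1 - 1 : Int)) = [] := by
        rw [PySem.List.slice_toNat _ (by omega) (by omega)]
        simp
      rw [h00]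
    · simp only [idxsCanon, spCanon, if_neg hx, List.nil_append, List.cons_append,
        List.length_cons, Nat.cast_add, Nat.cast_one]
      have hlist : (idxsCanon xs).map (· + 1) ++ [(xs.length : Int) + 1]
          = (idxsCanon xs ++ [(xs.length : Int)]).map (· + 1) := by
        simp
      rw [hlist]
      rw [goA_cons x xs _ (by simp)
            (by intro b hb
                simp only [List.mem_append, List.mem_singleton] at hb
                rcases hb with hb | rfl
                · exact le_trans (by omega) (idxsCanon_mem hb).1
                · positivity)
            (by intro b hb
                rw [List.dropLast_concat] at hb
                exact (idxsCanon_mem hb).1)]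
      have ih' : goA xs (0 :: (idxsCanon xs ++ [(xs.length : Int)])) = spCanon xs := by
        rw [← List.cons_append]; exact ih
      rw [ih']

-- A's indexed loop over the boundary list equals goA
theorem map_range_eq_goA (xs : List String) (B : List Int) :
    (List.range (B.length - 1)).map
      (fun (k : Nat) =>
        if (k : Int) < (B.length : Int) - 2 then
          PySem.List.slice xs (some (PySem.List.pyGetD B (k : Int) 0))
            (some (PySem.List.pyGetD B ((k : Int) + 1) 0 - 1))
        else
          PySem.List.slice xs (some (PySem.List.pyGetD B (k : Int) 0))
            (some (PySem.List.pyGetD B ((k : Int) + 1) 0))) = goA xs B := by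
  induction B with
  | nil => simp [goA]
  | cons b1 rest ih =>
    cases rest with
    | nil => simp [goA]
    | cons b2 rest2 =>
      have hlen : (b1 :: b2 :: rest2).length - 1 = rest2.length + 1 := by simp
      rw [hlen, List.range_succ_eq_map]
      simp only [List.map_cons, List.map_map]
      have hhead :
          (if ((0 : Nat) : Int) < ((b1 :: b2 :: rest2).length : Int) - 2 then
            PySem.List.slice xs (some (PySem.List.pyGetD (b1 :: b2 :: rest2) ((0 : Nat) : Int) 0))
              (some (PySem.List.pyGetD (b1 :: b2 :: rest2) (((0 : Nat) : Int) + 1) 0 - 1))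
          else
            PySem.List.slice xs (some (PySem.List.pyGetD (b1 :: b2 :: rest2) ((0 : Nat) : Int) 0))
              (some (PySem.List.pyGetD (b1 :: b2 :: rest2) (((0 : Nat) : Int) + 1) 0)))
          = (if rest2.isEmpty then PySem.List.slice xs (some b1) (some b2)
             else PySem.List.slice xs (some b1) (some (b2 - 1))) := by
        cases rest2 with
        | nil =>
          have h2 : PySem.List.pyGetD [b1, b2] 1 0 = b2 := by
            rw [show (1 : Int) = ((1 : Nat) : Int) from rfl, PySem.List.pyGetD_natCast]
            rfl
          simp [h2]
        | cons c cs =>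
          have hc : ((0 : Nat) : Int) < ((b1 :: b2 :: c :: cs).length : Int) - 2 := by
            simp
            omega
          rw [if_pos hc]
          have h2 : PySem.List.pyGetD (b1 :: b2 :: c :: cs) 1 0 = b2 := by
            rw [show (1 : Int) = ((1 : Nat) : Int) from rfl, PySem.List.pyGetD_natCast]
            rfl
          simp [h2]
      have htail : ∀ k : Nat,
          (if ((k + 1 : Nat) : Int) < ((b1 :: b2 :: rest2).length : Int) - 2 then
            PySem.List.slice xs (some (PySem.List.pyGetD (b1 :: b2 :: rest2) ((k + 1 : Nat) : Int) 0))
              (some (PySem.List.pyGetD (b1 :: b2 :: rest2) (((k + 1 : Nat) : Int) + 1) 0 - 1))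
          else
            PySem.List.slice xs (some (PySem.List.pyGetD (b1 :: b2 :: rest2) ((k + 1 : Nat) : Int) 0))
              (some (PySem.List.pyGetD (b1 :: b2 :: rest2) (((k + 1 : Nat) : Int) + 1) 0)))
          = (if (k : Int) < ((b2 :: rest2).length : Int) - 2 then
            PySem.List.slice xs (some (PySem.List.pyGetD (b2 :: rest2) (k : Int) 0))
              (some (PySem.List.pyGetD (b2 :: rest2) ((k : Int) + 1) 0 - 1))
          else
            PySem.List.slice xs (some (PySem.List.pyGetD (b2 :: rest2) (k : Int) 0))
              (some (PySem.List.pyGetD (b2 :: rest2) ((k : Int) + 1) 0))) := by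
        intro k
        have hcond : (((k + 1 : Nat) : Int) < ((b1 :: b2 :: rest2).length : Int) - 2)
            = ((k : Int) < ((b2 :: rest2).length : Int) - 2) := by
          simp only [List.length_cons]
          push_cast
          exact propext (by omega)
        have hidx1 : PySem.List.pyGetD (b1 :: b2 :: rest2) ((k + 1 : Nat) : Int) 0
            = PySem.List.pyGetD (b2 :: rest2) (k : Int) 0 := by
          rw [PySem.List.pyGetD_natCast, PySem.List.pyGetD_natCast]; simp
        have hidx2 : PySem.List.pyGetD (b1 :: b2 :: rest2) (((k + 1 : Nat) : Int) + 1) 0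
            = PySem.List.pyGetD (b2 :: rest2) ((k : Int) + 1) 0 := by
          have e1 : ((k + 1 : Nat) : Int) + 1 = ((k + 2 : Nat) : Int) := by push_cast; ring
          have e2 : ((k : Int) + 1) = ((k + 1 : Nat) : Int) := by push_cast; ring
          rw [e1, e2, PySem.List.pyGetD_natCast, PySem.List.pyGetD_natCast]; simp
        simp only [hcond, hidx1, hidx2]
      rw [hhead]
      have : (List.range (rest2.length + 1 - 1)).map
          (fun k => _) = goA xs (b2 :: rest2) := ih
      simp only [goA]
      congr 1
      calc (List.range rest2.length).map _
          = (List.range rest2.length).map (fun (k : Nat) =>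
            if (k : Int) < ((b2 :: rest2).length : Int) - 2 then
              PySem.List.slice xs (some (PySem.List.pyGetD (b2 :: rest2) (k : Int) 0))
                (some (PySem.List.pyGetD (b2 :: rest2) ((k : Int) + 1) 0 - 1))
            else
              PySem.List.slice xs (some (PySem.List.pyGetD (b2 :: rest2) (k : Int) 0))
                (some (PySem.List.pyGetD (b2 :: rest2) ((k : Int) + 1) 0))) := by
            apply List.map_congr_left; intro k _
            simp only [Function.comp_apply]
            exact htail k
        _ = goA xs (b2 :: rest2) := by
            have := ih
            simpa using this

-- A computes the canonical split
theorem portA_eq_spCanon (xs : List String) : SplitBandsSection xs = spCanon xs := by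
  unfold SplitBandsSection
  simp only []
  rw [filterMap_enumerate_eq xs 0]
  have hidxs : (idxsCanon xs).map (· + 0) = idxsCanon xs := by simp
  rw [hidxs, PySem.List.insert_zero]
  set B : List Int := (0 : Int) :: idxsCanon xs ++ [(xs.length : Int)] with hB
  have hbody : (fun (res : List (List String)) (i : Int) =>
      if i < ((B.length : Int)) - 2 then
        res ++ [PySem.List.slice xs (some (PySem.List.pyGetD B i 0))
                  (some (PySem.List.pyGetD B (i + 1) 0 - 1))]
      else
        res ++ [PySem.List.slice xs (some (PySem.List.pyGetD B i 0))
                  (some (PySem.List.pyGetD B (i + 1) 0))])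
      = (fun (res : List (List String)) (i : Int) =>
      res ++ [if i < ((B.length : Int)) - 2 then
        PySem.List.slice xs (some (PySem.List.pyGetD B i 0))
          (some (PySem.List.pyGetD B (i + 1) 0 - 1))
      else
        PySem.List.slice xs (some (PySem.List.pyGetD B i 0))
          (some (PySem.List.pyGetD B (i + 1) 0))]) := by
    funext res i
    split_ifs <;> rfl
  rw [hbody, PySem.List.foldl_append_singleton_eq_map, List.nil_append,
      PySem.List.pyRange_one, List.map_map]
  have hlen1 : 1 ≤ B.length := by simp [hB]
  have ht : (((B.length : Int) - 1) - 0).toNat = B.length - 1 := by omega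
  rw [ht]
  calc List.map _ (List.range (B.length - 1))
      = List.map (fun k : Nat =>
          if (k : Int) < (B.length : Int) - 2 then
            PySem.List.slice xs (some (PySem.List.pyGetD B (k : Int) 0))
              (some (PySem.List.pyGetD B ((k : Int) + 1) 0 - 1))
          else
            PySem.List.slice xs (some (PySem.List.pyGetD B (k : Int) 0))
              (some (PySem.List.pyGetD B ((k : Int) + 1) 0))) (List.range (B.length - 1)) := by
        apply List.map_congr_left
        intro k _
        simp only [Function.comp_apply, zero_add]
    _ = goA xs B := map_range_eq_goA xs B
    _ = spCanon xs := by rw [hB]; exact goA_idxs xs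

-- B's fold with an open accumulator
theorem portB_fold (xs : List String) :
    ∀ (res : List (List String)) (cur : List String),
    (let p := xs.foldl (fun st val =>
        if val = "|" then (st.1 ++ [st.2], ([] : List String))
        else (st.1, st.2 ++ [val])) (res, cur)
     p.1 ++ [p.2]) = res ++ (spCanon xs).modifyHead (cur ++ ·) := by
  induction xs with
  | nil => intro res cur; simp [spCanon, List.modifyHead]
  | cons x xs ih =>
    intro res cur
    simp only [List.foldl_cons]
    by_cases hx : x = "|"
    · rw [if_pos hx]
      simp only [spCanon, hx, List.modifyHead]
      rw [ih]
      have hid : (spCanon xs).modifyHead (fun x => x) = spCanon xs := by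
        cases spCanon xs <;> simp
      simp [hid]
    · rw [if_neg hx]
      simp only [spCanon, if_neg hx]
      rw [ih]
      congr 1
      cases h : spCanon xs with
      | nil => exact absurd h (spCanon_ne_nil xs)
      | cons a t => simp [List.modifyHead]

theorem portB_eq_spCanon (xs : List String) : SplitBandsSection_alt xs = spCanon xs := by
  unfold SplitBandsSection_alt
  have := portB_fold xs [] []
  have hid : (spCanon xs).modifyHead (fun x => x) = spCanon xs := by
    cases spCanon xs <;> simp
  simpa [hid] using this

-- ===== VERDICT (by name: the statement is the Claim_ definition above) =====
theorem SplitBandsSection_spec : Claim_equal_SplitBandsSection := by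
  intro xs _
  unfold Spec_SplitBandsSection
  rw [portA_eq_spCanon, portB_eq_spCanon]
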